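-- pv_equiv track=rewrite | github.com/flashman/code-samples | benchling/q6/q6.py | to_html_v1
-- ===== SOURCE A (Python) =====
-- TAGS = {"bold": "b", "italics": "i", "strike": "s"}
--
-- def to_html_v1(raw, fmt):
--     # Sort fmt by size.
--     order = [
--         k
--         for k, vals in sorted(
--             fmt.items(),
--             key=lambda f: max(end - start for start, end in f[1]),
--             reverse=True,
--         )
--     ]
--     fmt = {k: fmt[k] for k in order}
--
--     # Index format by position.
--     position_fmt = [[] for i in range(len(raw))]
--     for f, rngs in fmt.items():
--         for rng in rngs:
--             for i in range(*rng):
--                 if i < len(raw):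
--                     position_fmt[i].append(f)
--
--     # Assemble final html here.
--     html = []
--
--     # Keep stack of opened tags.
--     active_formats = []
--
--     for c, fmt in zip(raw, position_fmt):
--         # Close inactive formatting
--         remove_formats = [active for active in active_formats if active not in fmt]
--         if remove_formats:
--             af_min_index = min(active_formats.index(f) for f in remove_formats)
--
--             # Close everthing down to af_min_index starting from end.
--             remove_formats = active_formats[af_min_index:]
--             active_formats = active_formats[:af_min_index]
--             for af in remove_formats[::-1]:
--                 html.append(f"</{TAGS[af]}>")
--
--         # Open newly active formatting
--         new_formats = [f for f in fmt if f not in active_formats]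
--         if new_formats:
--             active_formats.extend(new_formats)
--             for nf in new_formats:
--                 html.append(f"<{TAGS[nf]}>")
--
--         # Add character
--         html.append(c)
--
--     # Close all active formats.
--     if active_formats:
--         for af in active_formats[::-1]:
--             html.append(f"</{TAGS[af]}>")
--
--     return "".join(html)
-- ===== SOURCE B (Python) =====
-- TAGS = {"bold": "b", "italics": "i", "strike": "s"}
--
-- def to_html_v1(raw, fmt):
--     # Change-point renderer: emit whole slices between format boundaries
--     # instead of walking character by character over a dense per-index table.
--     n = len(raw)
--     order = sorted(fmt, key=lambda k: max(e - s for s, e in fmt[k]), reverse=True)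
--
--     def formats_at(i):
--         return [k for k in order for s, e in fmt[k] if s <= i < e]
--
--     cuts = [0] + sorted({p for rngs in fmt.values() for se in rngs for p in se
--                          if 0 < p < n}) + ([n] if n else [])
--     out = []
--     stack = []
--     for a, b in zip(cuts, cuts[1:]):
--         cur = formats_at(a)
--         keep = 0
--         while keep < len(stack) and stack[keep] in cur:
--             keep += 1
--         for t in reversed(stack[keep:]):
--             out.append(f"</{TAGS[t]}>")
--         stack = stack[:keep]
--         new = [t for t in cur if t not in stack]
--         stack += new
--         for t in new:
--             out.append(f"<{TAGS[t]}>")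
--         out.append(raw[a:b])
--     for t in reversed(stack):
--         out.append(f"</{TAGS[t]}>")
--     return "".join(out)
-- ===== Notes on version B (the rewrite author's own statement) =====
-- stated objective: alternative
-- what changed: B replaces A's dense per-character format table and per-character loop by a change-point sweep: it collects the clipped range boundaries, sorts them, and between consecutive boundaries recomputes the active-format list once, adjusts the tag stack by a longest-kept-prefix rule, and emits the whole text slice at once.
-- outside the precondition, e.g. on to_html_v1('abc', {'bold': [(-2, 1)]}): A returns '<b>abc</b>', B returns '<b>a</b>bc'
import Mathlib
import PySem

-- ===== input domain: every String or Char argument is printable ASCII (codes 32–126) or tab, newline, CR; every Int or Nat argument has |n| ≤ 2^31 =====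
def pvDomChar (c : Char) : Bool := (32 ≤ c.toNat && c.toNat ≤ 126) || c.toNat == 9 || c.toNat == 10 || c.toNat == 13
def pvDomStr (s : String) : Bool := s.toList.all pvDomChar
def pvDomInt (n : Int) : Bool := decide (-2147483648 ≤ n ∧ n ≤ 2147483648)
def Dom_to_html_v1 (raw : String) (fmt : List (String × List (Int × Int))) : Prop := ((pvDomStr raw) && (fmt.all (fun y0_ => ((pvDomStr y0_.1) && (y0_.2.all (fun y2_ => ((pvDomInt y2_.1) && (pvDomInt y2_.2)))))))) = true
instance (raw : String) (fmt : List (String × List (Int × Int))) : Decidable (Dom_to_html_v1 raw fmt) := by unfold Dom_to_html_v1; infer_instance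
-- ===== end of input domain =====

-- B renders between sorted range-boundary change-points (one text slice at a time) instead of A's dense per-index format table and per-character loop; a change-point decomposition of the same rendering, equal output proved on Pre_.


-- ===== PORT A =====
-- TAGS[f]  (KeyError excluded by Pre_; default [] outside)
def pvTag (f : String) : List Char :=
  if f = "bold" then ['b'] else if f = "italics" then ['i'] else if f = "strike" then ['s'] else []

def pvOpenTag (f : String) : List Char := '<' :: (pvTag f ++ ['>'])
def pvCloseTag (f : String) : List Char := '<' :: '/' :: (pvTag f ++ ['>'])

-- max(end - start for start, end in rngs)   (ValueError on [] excluded by Pre_)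
def pvMaxLen (rngs : List (Int × Int)) : Int :=
  (PySem.List.max? (rngs.map (fun r => r.2 - r.1)) (fun x => x)).getD 0

-- the position_fmt build loop of A (Python list assignment wraps a negative index)
def pvBuildPos (n : Int) (items : List (String × List (Int × Int))) (init : List (List String)) : List (List String) :=
  items.foldl (fun pf kv =>
    kv.2.foldl (fun pf r =>
      (PySem.List.pyRange r.1 r.2 1).foldl (fun pf i =>
        if i < n then
          let j := if i < 0 then i + n else i
          if 0 ≤ j then pf.modify j.toNat (fun l => l ++ [kv.1]) else pf
        else pf) pf) pf) init

-- the body of A's character loop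
def pvStepA (st : List Char × List String) (cf : Char × List String) : List Char × List String :=
  let active := st.2
  let cur := cf.2
  let removes := active.filter (fun a => !cur.contains a)
  let p1 :=
    if removes.isEmpty then st
    else
      let idx := (PySem.List.min? (removes.map (fun f => (PySem.List.index? active f).getD 0)) (fun x => x)).getD 0
      (st.1 ++ ((active.drop idx).reverse.map pvCloseTag).flatten, active.take idx)
  let newF := cur.filter (fun f => !p1.2.contains f)
  let p2 := if newF.isEmpty then p1 else (p1.1 ++ (newF.map pvOpenTag).flatten, p1.2 ++ newF)
  (p2.1 ++ [cf.1], p2.2)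

def to_html_v1 (raw : String) (fmt : List (String × List (Int × Int))) : String :=
  let chars := raw.toList
  let n : Int := (chars.length : Int)
  let items := PySem.List.sorted fmt (fun kv => pvMaxLen kv.2) true
  let posFmt := pvBuildPos n items (List.replicate chars.length ([] : List String))
  let st := (chars.zip posFmt).foldl pvStepA ([], [])
  String.ofList (st.1 ++ (st.2.reverse.map pvCloseTag).flatten)

-- ===== PORT B =====
-- [k for k in order for s, e in fmt[k] if s <= i < e]
def pvCover (i : Int) (r : Int × Int) : Bool := decide (r.1 ≤ i) && decide (i < r.2)

def pvFmtsAt (order : List (String × List (Int × Int))) (i : Int) : List String :=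
  order.flatMap (fun kv => (kv.2.filter (pvCover i)).map (fun _ => kv.1))

-- while keep < len(stack) and stack[keep] in cur: keep += 1
def pvKeep (stack cur : List String) : Nat :=
  match stack with
  | [] => 0
  | t :: rest => if cur.contains t then pvKeep rest cur + 1 else 0

-- the body of B's change-point loop
def pvStepB (chars : List Char) (order : List (String × List (Int × Int)))
    (st : List Char × List String) (ab : Int × Int) : List Char × List String :=
  let cur := pvFmtsAt order ab.1
  let keep := pvKeep st.2 cur
  let html := st.1 ++ ((st.2.drop keep).reverse.map pvCloseTag).flatten
  let stack := st.2.take keep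
  let newF := cur.filter (fun t => !stack.contains t)
  (html ++ (newF.map pvOpenTag).flatten ++ PySem.List.slice chars (some ab.1) (some ab.2), stack ++ newF)

def to_html_v1_alt (raw : String) (fmt : List (String × List (Int × Int))) : String :=
  let chars := raw.toList
  let n : Int := (chars.length : Int)
  let order := PySem.List.sorted fmt (fun kv => pvMaxLen kv.2) true
  let pts := PySem.List.sorted
    (PySem.Set.ofList ((fmt.flatMap (fun kv => kv.2.flatMap (fun r => [r.1, r.2]))).filter
      (fun p => decide (0 < p) && decide (p < n)))) (fun x => x) false
  let cuts := 0 :: (pts ++ (if n = 0 then [] else [n]))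
  let st := (cuts.zip cuts.tail).foldl (pvStepB chars order) ([], [])
  String.ofList (st.1 ++ (st.2.reverse.map pvCloseTag).flatten)

-- ===== PRECONDITION & SPEC =====
-- Pre_ excludes inputs on which the Python A raises — a format with an empty range list (ValueError),
-- a key outside TAGS whose ranges reach a text position (KeyError) — plus ranges with a negative start,
-- where A raises IndexError when the start lies before -len(raw) and otherwise wraps the negative index
-- around accidentally; it also excludes duplicate keys, which a Python dict cannot represent.
def Pre_to_html_v1 (raw : String) (fmt : List (String × List (Int × Int))) : Prop :=
  (fmt.map Prod.fst).Nodup ∧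
  ∀ kv ∈ fmt, kv.2 ≠ [] ∧
    (∀ r ∈ kv.2, r.1 < r.2 → 0 ≤ r.1) ∧
    (kv.1 ∉ (["bold", "italics", "strike"] : List String) →
      ∀ r ∈ kv.2, ¬(r.1 < r.2 ∧ r.1 < (raw.toList.length : Int)))
instance (raw : String) (fmt : List (String × List (Int × Int))) : Decidable (Pre_to_html_v1 raw fmt) := by unfold Pre_to_html_v1; infer_instance

def pvWitness_to_html_v1 : String × (List (String × List (Int × Int))) :=
  ("hello world", [("bold", [(0, 4), (6, 8)]), ("italics", [(2, 7)])])

def Spec_to_html_v1 (raw : String) (fmt : List (String × List (Int × Int))) (out : String) : Prop := out = to_html_v1_alt raw fmt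
instance (raw : String) (fmt : List (String × List (Int × Int))) (out : String) : Decidable (Spec_to_html_v1 raw fmt out) := by unfold Spec_to_html_v1; infer_instance

-- ===== CLAIM (what is proved, stated in full; the proofs are below) =====
def Claim_equal_to_html_v1 : Prop := ∀ (raw : String) (fmt : List (String × List (Int × Int))), Dom_to_html_v1 raw fmt → Pre_to_html_v1 raw fmt → Spec_to_html_v1 raw fmt (to_html_v1 raw fmt)

-- ===== LEMMAS AND PROOFS =====

-- the new stack after one stack adjustment against the active list cur
def pvNStack (stack cur : List String) : List String :=
  stack.take (pvKeep stack cur) ++ cur.filter (fun t => !(stack.take (pvKeep stack cur)).contains t)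

-- A's character pairs over the half-open index interval [a, b)
def pvAseg (chars : List Char) (items : List (String × List (Int × Int))) (a b : Int) :
    List (Char × List String) :=
  (PySem.List.slice chars (some a) (some b)).zip ((PySem.List.pyRange a b 1).map (pvFmtsAt items))

-- ---- pvKeep facts ----
theorem pvKeep_le (stack cur : List String) : pvKeep stack cur ≤ stack.length := by
  induction stack with
  | nil => simp [pvKeep]
  | cons t rest ih => simp only [pvKeep]; split <;> simp <;> omega

theorem pvKeep_take_mem (stack cur : List String) :
    ∀ t ∈ stack.take (pvKeep stack cur), cur.contains t = true := by
  induction stack with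
  | nil => simp
  | cons t rest ih =>
    simp only [pvKeep]; split
    · rename_i h; intro x hx
      rcases List.mem_cons.mp (by simpa using hx) with h1 | h1
      · exact h1 ▸ h
      · exact ih x h1
    · simp

theorem pvKeep_decomp (stack cur : List String) (h : pvKeep stack cur < stack.length) :
    ∃ v rest', stack = stack.take (pvKeep stack cur) ++ v :: rest' ∧ cur.contains v = false := by
  induction stack with
  | nil => simp at h
  | cons t rest ih =>
    by_cases hc : cur.contains t
    · have h' : pvKeep rest cur < rest.length := by
        simp only [pvKeep, hc, if_true, List.length_cons] at h; omega
      obtain ⟨v, rest', hdec, hv⟩ := ih h'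
      refine ⟨v, rest', ?_, hv⟩
      simp only [pvKeep, hc, if_true, List.take_succ_cons]
      exact congrArg (t :: ·) hdec
    · have hcf : cur.contains t = false := Bool.eq_false_iff.mpr hc
      have hm : t ∉ cur := fun hmem => hc (List.contains_iff_mem.mpr hmem)
      refine ⟨t, rest, ?_, hcf⟩
      simp [pvKeep, hm]

theorem pvKeep_eq_len (stack cur : List String) (h : ∀ t ∈ stack, cur.contains t = true) :
    pvKeep stack cur = stack.length := by
  induction stack with
  | nil => simp [pvKeep]
  | cons t rest ih =>
    simp only [pvKeep, h t (by simp), if_true]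
    simp [ih (fun x hx => h x (List.mem_cons_of_mem _ hx))]

-- ---- one A step in normal form ----
theorem open_ite (h : List Char) (s l : List String) :
    (if l.isEmpty then (h, s) else (h ++ (l.map pvOpenTag).flatten, s ++ l)) =
      (h ++ (l.map pvOpenTag).flatten, s ++ l) := by
  cases l <;> simp

theorem stepA_eq (html : List Char) (stack cur : List String) (c : Char) :
    pvStepA (html, stack) (c, cur) =
      (html ++ ((stack.drop (pvKeep stack cur)).reverse.map pvCloseTag).flatten
            ++ ((cur.filter (fun t => !(stack.take (pvKeep stack cur)).contains t)).map pvOpenTag).flatten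
            ++ [c],
       pvNStack stack cur) := by
  by_cases hrem : stack.filter (fun a => !cur.contains a) = []
  · have hall : ∀ t ∈ stack, cur.contains t = true := by
      intro t ht
      have := List.filter_eq_nil_iff.mp hrem t ht
      simpa using this
    have hklen : pvKeep stack cur = stack.length := pvKeep_eq_len stack cur hall
    unfold pvStepA pvNStack
    simp only [hrem, hklen, List.isEmpty_nil, if_true, List.drop_length, List.take_length,
      List.reverse_nil, List.map_nil, List.flatten_nil, List.append_nil]
    rw [open_ite]
  · have hklt : pvKeep stack cur < stack.length := by
      rcases lt_or_eq_of_le (pvKeep_le stack cur) with h | h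
      · exact h
      · exfalso
        apply hrem
        apply List.filter_eq_nil_iff.mpr
        intro a ha
        have hca : cur.contains a = true := by
          apply pvKeep_take_mem stack cur
          rw [h, List.take_length]; exact ha
        rw [hca]; decide
    obtain ⟨v, rest', hdec, hv⟩ := pvKeep_decomp stack cur hklt
    set k := pvKeep stack cur with hk
    have hvpre : v ∉ stack.take k := by
      intro hmem
      have := pvKeep_take_mem stack cur v hmem
      rw [hv] at this; exact absurd this (by simp)
    have hidx : PySem.List.index? stack v = some k := by
      rw [PySem.List.index?_eq_some_iff]
      refine ⟨stack.take k, rest', by simpa using hdec, ?_, hvpre⟩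
      rw [List.length_take]; omega
    have hlow : ∀ f ∈ stack.filter (fun a => !cur.contains a),
        k ≤ (PySem.List.index? stack f).getD 0 := by
      intro f hf
      have hfs : f ∈ stack := List.mem_of_mem_filter hf
      have hfc : cur.contains f = false := by simpa using (List.mem_filter.mp hf).2
      obtain ⟨j, hj⟩ := Option.isSome_iff_exists.mp
        ((PySem.List.index?_isSome_iff stack f).mpr hfs)
      rw [hj]; simp only [Option.getD_some]
      by_contra hlt
      push_neg at hlt
      obtain ⟨pre, suf, hps, hlen, _⟩ := (PySem.List.index?_eq_some_iff stack f j).mp hj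
      have hmemtake : f ∈ stack.take k := by
        rw [hps, List.take_append]
        have h1 : pre.take k = pre := List.take_of_length_le (by omega)
        rw [h1]
        apply List.mem_append_right
        cases hq : k - pre.length with
        | zero => omega
        | succ q => simp
      have := pvKeep_take_mem stack cur f hmemtake
      rw [hfc] at this; exact absurd this (by simp)
    have hkmem : k ∈
        (stack.filter (fun a => !cur.contains a)).map (fun f => (PySem.List.index? stack f).getD 0) := by
      apply List.mem_map.mpr
      refine ⟨v, ?_, by rw [hidx]; rfl⟩
      apply List.mem_filter.mpr
      refine ⟨by rw [hdec]; exact List.mem_append_right _ (by simp), ?_⟩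
      rw [hv]; decide
    have hmin : (PySem.List.min?
        ((stack.filter (fun a => !cur.contains a)).map (fun f => (PySem.List.index? stack f).getD 0))
        (fun x => x)).getD 0 = k := by
      cases hm : PySem.List.min?
        ((stack.filter (fun a => !cur.contains a)).map (fun f => (PySem.List.index? stack f).getD 0))
        (fun x => x) with
      | none =>
        exfalso
        have := (PySem.List.min?_eq_none_iff _ _).mp hm
        rw [this] at hkmem; simp at hkmem
      | some m =>
        simp only [Option.getD_some]
        have h1 : m ≤ k := PySem.List.min?_isMin hm _ hkmem
        have h2 : k ≤ m := by
          obtain ⟨f, hf, hfm⟩ := List.mem_map.mp (PySem.List.min?_mem hm)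
          rw [← hfm]; exact hlow f hf
        omega
    have hrem' : (stack.filter (fun a => !cur.contains a)).isEmpty = false := by
      cases h : stack.filter (fun a => !cur.contains a) with
      | nil => exact absurd h hrem
      | cons x xs => simp
    unfold pvStepA pvNStack
    simp only [hrem', Bool.false_eq_true, if_false, hmin, ← hk]
    rw [open_ite]

-- synchronised stack: the step only appends the character
theorem stepA_idle (html : List Char) (stack cur : List String) (c : Char)
    (h1 : ∀ t ∈ stack, cur.contains t = true) (h2 : ∀ t ∈ cur, stack.contains t = true) :
    pvStepA (html, stack) (c, cur) = (html ++ [c], stack) := by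
  have hrem : stack.filter (fun a => !cur.contains a) = [] :=
    List.filter_eq_nil_iff.mpr (fun a ha => by rw [h1 a ha]; decide)
  have hnew : cur.filter (fun f => !stack.contains f) = [] :=
    List.filter_eq_nil_iff.mpr (fun a ha => by rw [h2 a ha]; decide)
  unfold pvStepA
  simp only [hrem, hnew, List.isEmpty_nil, if_true]

theorem pvNStack_sync (stack cur : List String) :
    (∀ t ∈ pvNStack stack cur, cur.contains t = true) ∧
    (∀ t ∈ cur, (pvNStack stack cur).contains t = true) := by
  constructor
  · intro t ht
    rcases List.mem_append.mp ht with h | h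
    · exact pvKeep_take_mem stack cur t h
    · exact List.contains_iff_mem.mpr (List.mem_of_mem_filter h)
  · intro t ht
    by_cases hc : (stack.take (pvKeep stack cur)).contains t
    · exact List.contains_iff_mem.mpr
        (List.mem_append_left _ (List.contains_iff_mem.mp hc))
    · apply List.contains_iff_mem.mpr
      apply List.mem_append_right
      have hcf : (stack.take (pvKeep stack cur)).contains t = false := Bool.eq_false_iff.mpr hc
      exact List.mem_filter.mpr ⟨ht, by rw [hcf]; decide⟩

-- after the stack adjustment the step only appends characters
theorem idle_fold (seg : List Char) (cur : List String) :
    ∀ (html : List Char) (stack : List String),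
    (∀ t ∈ stack, cur.contains t = true) → (∀ t ∈ cur, stack.contains t = true) →
    (seg.zip (List.replicate seg.length cur)).foldl pvStepA (html, stack) = (html ++ seg, stack) := by
  induction seg with
  | nil => intro html stack _ _; simp
  | cons c s ih =>
    intro html stack h1 h2
    simp only [List.length_cons, List.replicate_succ, List.zip_cons_cons, List.foldl_cons]
    rw [stepA_idle html stack cur c h1 h2, ih (html ++ [c]) stack h1 h2]
    simp

-- fold of A's step over a constant-format segment
theorem segment_fold (seg : List Char) (hne : seg ≠ []) (cur : List String)
    (html : List Char) (stack : List String) :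
    (seg.zip (List.replicate seg.length cur)).foldl pvStepA (html, stack) =
      (html ++ ((stack.drop (pvKeep stack cur)).reverse.map pvCloseTag).flatten
            ++ ((cur.filter (fun t => !(stack.take (pvKeep stack cur)).contains t)).map pvOpenTag).flatten
            ++ seg,
       pvNStack stack cur) := by
  cases seg with
  | nil => exact absurd rfl hne
  | cons c s =>
    simp only [List.length_cons, List.replicate_succ, List.zip_cons_cons, List.foldl_cons]
    rw [stepA_eq html stack cur c]
    rw [idle_fold s cur _ _ (pvNStack_sync stack cur).1 (pvNStack_sync stack cur).2]
    simp

-- ---- position table characterisation ----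
theorem range_step_length (n : Int) (g : String) (pf : List (List String)) (i : Int) :
    ((if i < n then
        (let j := if i < 0 then i + n else i;
         if 0 ≤ j then pf.modify j.toNat (fun l => l ++ [g]) else pf)
      else pf) : List (List String)).length = pf.length := by
  by_cases h1 : i < n
  · rw [if_pos h1]
    show (if 0 ≤ (if i < 0 then i + n else i) then
        pf.modify (if i < 0 then i + n else i).toNat (fun l => l ++ [g]) else pf).length = pf.length
    repeat' split
    all_goals first | rfl | simp [List.length_modify]
  · rw [if_neg h1]

theorem range_fold_length (n : Int) (g : String) (is : List Int) :
    ∀ pf : List (List String),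
    (is.foldl (fun pf i => if i < n then
        (let j := if i < 0 then i + n else i;
         if 0 ≤ j then pf.modify j.toNat (fun l => l ++ [g]) else pf)
      else pf) pf).length = pf.length := by
  induction is with
  | nil => intro pf; rfl
  | cons i is ih =>
    intro pf
    rw [List.foldl_cons, ih]
    exact range_step_length n g pf i

theorem range_fold_get (n : Int) (g : String) :
    ∀ (m : Nat) (s e : Int), (e - s).toNat = m → (s < e → 0 ≤ s) →
    ∀ (pf : List (List String)), (pf.length : Int) = n →
    ∀ (k : Nat) (hk : k < pf.length),
    ((PySem.List.pyRange s e 1).foldl (fun pf i => if i < n then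
        (let j := if i < 0 then i + n else i;
         if 0 ≤ j then pf.modify j.toNat (fun l => l ++ [g]) else pf)
      else pf) pf)[k]? =
      some (pf[k] ++ if s ≤ (k : Int) ∧ (k : Int) < e then [g] else []) := by
  intro m
  induction m with
  | zero =>
    intro s e hm hse pf hlen k hk
    have he : e ≤ s := by omega
    rw [PySem.List.pyRange_one_eq_nil he, List.foldl_nil, if_neg (by omega),
      List.append_nil, List.getElem?_eq_getElem hk]
  | succ m ih =>
    intro s e hm hse pf hlen k hk
    have hlt : s < e := by omega
    have hs0 : 0 ≤ s := hse hlt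
    rw [PySem.List.pyRange_one_cons hlt, List.foldl_cons]
    have hj : (if s < 0 then s + n else s) = s := if_neg (by omega)
    by_cases hcase : s < n
    · have hstep : (if s < n then
          (let j := if s < 0 then s + n else s;
           if 0 ≤ j then pf.modify j.toNat (fun l => l ++ [g]) else pf)
        else pf) = pf.modify s.toNat (fun l => l ++ [g]) := by
        rw [if_pos hcase]
        show (if 0 ≤ (if s < 0 then s + n else s) then
            pf.modify (if s < 0 then s + n else s).toNat (fun l => l ++ [g]) else pf) =
          pf.modify s.toNat (fun l => l ++ [g])
        rw [hj, if_pos hs0]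
      rw [hstep]
      have hlen2 : (pf.modify s.toNat (fun l => l ++ [g])).length = pf.length :=
        List.length_modify _ _ _
      have hrec := ih (s + 1) e (by omega) (fun _ => by omega)
        (pf.modify s.toNat (fun l => l ++ [g])) (by rw [hlen2]; exact hlen) k (by omega)
      rw [hrec]
      have hmk : (pf.modify s.toNat (fun l => l ++ [g]))[k]? =
          some (if s.toNat = k then pf[k] ++ [g] else pf[k]) := by
        rw [List.getElem?_modify, List.getElem?_eq_getElem hk]
        by_cases hq : s.toNat = k
        · simp [hq]
        · simp [hq]
      have hget : (pf.modify s.toNat (fun l => l ++ [g]))[k]'(by omega) =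
          (if s.toNat = k then pf[k] ++ [g] else pf[k]) := by
        have h2 := List.getElem?_eq_getElem
          (l := pf.modify s.toNat (fun l => l ++ [g])) (i := k) (by omega)
        rw [h2] at hmk
        exact Option.some.inj hmk
      rw [hget]
      by_cases hks : s.toNat = k
      · rw [if_pos hks]
        rw [if_pos (show s ≤ (k : Int) ∧ (k : Int) < e by omega)]
        rw [if_neg (show ¬(s + 1 ≤ (k : Int) ∧ (k : Int) < e) by omega)]
        simp
      · rw [if_neg hks]
        by_cases hc2 : s + 1 ≤ (k : Int) ∧ (k : Int) < e
        · rw [if_pos hc2, if_pos (show s ≤ (k : Int) ∧ (k : Int) < e by omega)]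
        · rw [if_neg hc2, if_neg (show ¬(s ≤ (k : Int) ∧ (k : Int) < e) by omega)]
    · have hstep : (if s < n then
          (let j := if s < 0 then s + n else s;
           if 0 ≤ j then pf.modify j.toNat (fun l => l ++ [g]) else pf)
        else pf) = pf := if_neg hcase
      rw [hstep]
      have hrec := ih (s + 1) e (by omega) (fun _ => by omega) pf hlen k hk
      rw [hrec]
      have hkn : (k : Int) < n := by omega
      rw [if_neg (show ¬(s + 1 ≤ (k : Int) ∧ (k : Int) < e) by omega)]
      rw [if_neg (show ¬(s ≤ (k : Int) ∧ (k : Int) < e) by omega)]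

theorem rngs_fold_length (n : Int) (g : String) (rngs : List (Int × Int)) :
    ∀ pf : List (List String),
    (rngs.foldl (fun pf r =>
      (PySem.List.pyRange r.1 r.2 1).foldl (fun pf i => if i < n then
          (let j := if i < 0 then i + n else i;
           if 0 ≤ j then pf.modify j.toNat (fun l => l ++ [g]) else pf)
        else pf) pf) pf).length = pf.length := by
  induction rngs with
  | nil => intro pf; rfl
  | cons r rest ih =>
    intro pf
    rw [List.foldl_cons, ih, range_fold_length]

theorem rngs_fold_get (n : Int) (g : String) :
    ∀ (rngs : List (Int × Int)), (∀ r ∈ rngs, r.1 < r.2 → 0 ≤ r.1) →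
    ∀ (pf : List (List String)), (pf.length : Int) = n →
    ∀ (k : Nat) (hk : k < pf.length),
    (rngs.foldl (fun pf r =>
      (PySem.List.pyRange r.1 r.2 1).foldl (fun pf i => if i < n then
          (let j := if i < 0 then i + n else i;
           if 0 ≤ j then pf.modify j.toNat (fun l => l ++ [g]) else pf)
        else pf) pf) pf)[k]? =
      some (pf[k] ++ (rngs.filter (pvCover (k : Int))).map (fun _ => g)) := by
  intro rngs
  induction rngs with
  | nil =>
    intro _ pf hlen k hk
    rw [List.foldl_nil, List.filter_nil, List.map_nil, List.append_nil,
      List.getElem?_eq_getElem hk]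
  | cons r rest ih =>
    intro hpre pf hlen k hk
    rw [List.foldl_cons]
    have hlen1 := range_fold_length n g (PySem.List.pyRange r.1 r.2 1) pf
    have hrec := ih (fun x hx => hpre x (List.mem_cons_of_mem _ hx)) _
      (by rw [hlen1]; exact hlen) k (by omega)
    rw [hrec]
    have h1 := range_fold_get n g (r.2 - r.1).toNat r.1 r.2 rfl
      (hpre r (by simp)) pf hlen k hk
    have hget : ((PySem.List.pyRange r.1 r.2 1).foldl (fun pf i => if i < n then
          (let j := if i < 0 then i + n else i;
           if 0 ≤ j then pf.modify j.toNat (fun l => l ++ [g]) else pf)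
        else pf) pf)[k]'(by omega) =
        (pf[k] ++ if r.1 ≤ (k : Int) ∧ (k : Int) < r.2 then [g] else []) := by
      have h2 := List.getElem?_eq_getElem
        (l := (PySem.List.pyRange r.1 r.2 1).foldl (fun pf i => if i < n then
          (let j := if i < 0 then i + n else i;
           if 0 ≤ j then pf.modify j.toNat (fun l => l ++ [g]) else pf)
        else pf) pf) (i := k) (by omega)
      rw [h2] at h1
      exact Option.some.inj h1
    rw [hget, List.filter_cons]
    by_cases hcov : r.1 ≤ (k : Int) ∧ (k : Int) < r.2
    · rw [if_pos hcov, if_pos (by simp [pvCover]; omega)]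
      simp
    · rw [if_neg hcov, if_neg (by simp [pvCover]; omega)]
      simp

theorem buildPos_length (n : Int) (items : List (String × List (Int × Int)))
    (init : List (List String)) :
    (pvBuildPos n items init).length = init.length := by
  unfold pvBuildPos
  induction items generalizing init with
  | nil => rfl
  | cons kv rest ih =>
    rw [List.foldl_cons, ih, rngs_fold_length]

theorem buildPos_get (n : Int) (items : List (String × List (Int × Int)))
    (hpre : ∀ kv ∈ items, ∀ r ∈ kv.2, r.1 < r.2 → 0 ≤ r.1) :
    ∀ (init : List (List String)), (init.length : Int) = n →
    ∀ (k : Nat) (hk : k < init.length),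
    (pvBuildPos n items init)[k]? = some (init[k] ++ pvFmtsAt items (k : Int)) := by
  unfold pvBuildPos pvFmtsAt
  induction items with
  | nil =>
    intro init hlen k hk
    rw [List.foldl_nil, List.flatMap_nil, List.append_nil, List.getElem?_eq_getElem hk]
  | cons kv rest ih =>
    intro init hlen k hk
    rw [List.foldl_cons]
    have hlen1 := rngs_fold_length n kv.1 kv.2 init
    have hrec := ih (fun x hx => hpre x (List.mem_cons_of_mem _ hx)) _
      (by rw [hlen1]; exact hlen) k (by omega)
    rw [hrec]
    have h1 := rngs_fold_get n kv.1 kv.2 (hpre kv (by simp)) init hlen k hk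
    have hget : (kv.2.foldl (fun pf r =>
        (PySem.List.pyRange r.1 r.2 1).foldl (fun pf i => if i < n then
            (let j := if i < 0 then i + n else i;
             if 0 ≤ j then pf.modify j.toNat (fun l => l ++ [kv.1]) else pf)
          else pf) pf) init)[k]'(by omega) =
        (init[k] ++ (kv.2.filter (pvCover (k : Int))).map (fun _ => kv.1)) := by
      have h2 := List.getElem?_eq_getElem (l := kv.2.foldl (fun pf r =>
        (PySem.List.pyRange r.1 r.2 1).foldl (fun pf i => if i < n then
            (let j := if i < 0 then i + n else i;
             if 0 ≤ j then pf.modify j.toNat (fun l => l ++ [kv.1]) else pf)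
          else pf) pf) init) (i := k) (by omega)
      rw [h2] at h1
      exact Option.some.inj h1
    rw [hget, List.flatMap_cons, List.append_assoc]

-- ---- main chain over the change points ----
theorem chain_fold (chars : List Char) (items : List (String × List (Int × Int)))
    (n : Int) (hn : n = (chars.length : Int)) :
    ∀ (cl : List Int) (a : Int) (st : List Char × List String),
    List.IsChain (fun p q => p < q ∧ 0 ≤ p ∧ q ≤ n ∧
      ∀ i, p ≤ i → i < q → pvFmtsAt items i = pvFmtsAt items p) (a :: cl) →
    (a :: cl).getLast (by simp) = n →
    (pvAseg chars items a n).foldl pvStepA st =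
      ((a :: cl).zip cl).foldl (pvStepB chars items) st := by
  intro cl
  induction cl with
  | nil =>
    intro a st _ hlast
    have ha : a = n := by simpa using hlast
    subst ha
    have h0n : (0 : Int) ≤ a := hn ▸ Int.natCast_nonneg _
    have hsl : PySem.List.slice chars (some a) (some a) = [] := by
      rw [PySem.List.slice_toNat chars h0n h0n]
      simp
    simp [pvAseg, hsl]
  | cons b rest ih =>
    intro a st hch hlast
    obtain ⟨hR, hch'⟩ := List.isChain_cons_cons.mp hch
    obtain ⟨hab, ha0, hbn, hconst⟩ := hR
    have hlast' : (b :: rest).getLast (by simp) = n := by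
      rwa [List.getLast_cons (by simp)] at hlast
    have h0n : (0 : Int) ≤ n := hn ▸ Int.natCast_nonneg _
    have hb0 : (0 : Int) ≤ b := by omega
    have hlenchars : chars.length = n.toNat := by omega
    have hAB : a.toNat ≤ b.toNat := by omega
    have hBN : b.toNat ≤ n.toNat := by omega
    -- the characters of [a, n) split at b
    have hdrop : PySem.List.slice chars (some a) (some n) = chars.drop a.toNat := by
      rw [PySem.List.slice_toNat chars ha0 h0n]
      exact List.take_of_length_le (by simp [List.length_drop]; omega)
    have hdropb : PySem.List.slice chars (some b) (some n) = chars.drop b.toNat := by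
      rw [PySem.List.slice_toNat chars hb0 h0n]
      exact List.take_of_length_le (by simp [List.length_drop]; omega)
    have hslice_split : PySem.List.slice chars (some a) (some n) =
        PySem.List.slice chars (some a) (some b) ++ PySem.List.slice chars (some b) (some n) := by
      rw [hdrop, hdropb, PySem.List.slice_toNat chars ha0 hb0]
      have h1 := (List.take_append_drop (b.toNat - a.toNat) (chars.drop a.toNat)).symm
      rw [List.drop_drop, show a.toNat + (b.toNat - a.toNat) = b.toNat by omega] at h1
      exact h1
    have hlenab : (PySem.List.slice chars (some a) (some b)).length = (b - a).toNat := by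
      rw [PySem.List.slice_toNat chars ha0 hb0]
      simp [List.length_take, List.length_drop]
      omega
    have hsplit : pvAseg chars items a n = pvAseg chars items a b ++ pvAseg chars items b n := by
      unfold pvAseg
      rw [hslice_split, PySem.List.pyRange_one_append a b n (le_of_lt hab) hbn, List.map_append]
      exact List.zip_append (by rw [hlenab]; simp [PySem.List.length_pyRange_one])
    have hmapconst : (PySem.List.pyRange a b 1).map (pvFmtsAt items) =
        List.replicate (b - a).toNat (pvFmtsAt items a) := by
      rw [List.map_congr_left (fun i hi => hconst i (PySem.List.mem_pyRange_one.mp hi).1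
        (PySem.List.mem_pyRange_one.mp hi).2)]
      rw [List.map_const', PySem.List.length_pyRange_one]
    obtain ⟨html, stack⟩ := st
    have hne : PySem.List.slice chars (some a) (some b) ≠ [] := by
      apply List.ne_nil_of_length_pos
      rw [hlenab]; omega
    have hseg : (pvAseg chars items a b).foldl pvStepA (html, stack) =
        pvStepB chars items (html, stack) (a, b) := by
      unfold pvAseg
      rw [hmapconst, ← hlenab]
      rw [segment_fold _ hne (pvFmtsAt items a) html stack]
      unfold pvStepB pvNStack
      simp [List.append_assoc]
    rw [hsplit, List.foldl_append, hseg, List.zip_cons_cons, List.foldl_cons]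
    exact ih b (pvStepB chars items (html, stack) (a, b)) hch' hlast'

-- ---- the active-format list is constant between change points ----
theorem fmts_const (items : List (String × List (Int × Int))) (pts : List Int) (n p q : Int)
    (hp : 0 ≤ p) (hq : q ≤ n)
    (hgap : ∀ x ∈ pts, ¬(p < x ∧ x < q))
    (hbnd : ∀ kv ∈ items, ∀ r ∈ kv.2,
      (0 < r.1 → r.1 < n → r.1 ∈ pts) ∧ (0 < r.2 → r.2 < n → r.2 ∈ pts))
    (hpre : ∀ kv ∈ items, ∀ r ∈ kv.2, r.1 < r.2 → 0 ≤ r.1) :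
    ∀ i, p ≤ i → i < q → pvFmtsAt items i = pvFmtsAt items p := by
  intro i hpi hiq
  unfold pvFmtsAt
  rw [List.flatMap_def, List.flatMap_def]
  congr 1
  apply List.map_congr_left
  intro kv hkv
  congr 1
  apply List.filter_congr
  intro r hr
  have h1 := (hbnd kv hkv r hr).1
  have h2 := (hbnd kv hkv r hr).2
  have h3 := hpre kv hkv r hr
  have hiff : (r.1 ≤ i ∧ i < r.2) ↔ (r.1 ≤ p ∧ p < r.2) := by
    constructor
    · rintro ⟨ha, hb⟩
      have hr0 : 0 ≤ r.1 := h3 (by omega)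
      constructor
      · by_contra hcon
        have hx : r.1 ∈ pts := h1 (by omega) (by omega)
        exact hgap _ hx ⟨by omega, by omega⟩
      · omega
    · rintro ⟨ha, hb⟩
      refine ⟨by omega, ?_⟩
      by_cases hn2 : r.2 < n
      · have hx : r.2 ∈ pts := h2 (by omega) hn2
        have := hgap _ hx
        omega
      · omega
  show pvCover i r = pvCover p r
  unfold pvCover
  rw [← Bool.decide_and, ← Bool.decide_and]
  exact decide_eq_decide.mpr hiff

-- ---- the cut list is a chain of constant-format gaps ----
theorem cuts_chain_aux (items : List (String × List (Int × Int))) (pts : List Int) (n : Int)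
    (hbnd : ∀ kv ∈ items, ∀ r ∈ kv.2,
      (0 < r.1 → r.1 < n → r.1 ∈ pts) ∧ (0 < r.2 → r.2 < n → r.2 ∈ pts))
    (hpre : ∀ kv ∈ items, ∀ r ∈ kv.2, r.1 < r.2 → 0 ≤ r.1) :
    ∀ (l : List Int) (lo : Int), 0 ≤ lo → lo < n →
    l.Pairwise (· < ·) → (∀ x ∈ l, lo < x ∧ x < n) →
    (∀ x ∈ pts, lo < x → x ∈ l) →
    List.IsChain (fun p q => p < q ∧ 0 ≤ p ∧ q ≤ n ∧
      ∀ i, p ≤ i → i < q → pvFmtsAt items i = pvFmtsAt items p) (lo :: (l ++ [n])) := by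
  intro l
  induction l with
  | nil =>
    intro lo hlo0 hlon _ _ hcompl
    simp only [List.nil_append]
    apply List.isChain_cons_cons.mpr
    refine ⟨⟨hlon, hlo0, le_refl n, ?_⟩, by simp⟩
    exact fmts_const items pts n lo n hlo0 (le_refl n)
      (fun x hx hcon => absurd (hcompl x hx hcon.1) (by simp)) hbnd hpre
  | cons y l' ih =>
    intro lo hlo0 hlon hpw hbounds hcompl
    have hy := hbounds y (by simp)
    have hpwy : ∀ x ∈ l', y < x := fun x hx => List.rel_of_pairwise_cons hpw hx
    apply List.isChain_cons_cons.mpr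
    constructor
    · refine ⟨hy.1, hlo0, le_of_lt hy.2, ?_⟩
      apply fmts_const items pts n lo y hlo0 (le_of_lt hy.2) ?_ hbnd hpre
      rintro x hx ⟨hx1, hx2⟩
      rcases List.mem_cons.mp (hcompl x hx hx1) with h | h
      · omega
      · have := hpwy x h; omega
    · exact ih y (by omega) hy.2 (List.Pairwise.of_cons hpw)
        (fun x hx => ⟨hpwy x hx, (hbounds x (List.mem_cons_of_mem _ hx)).2⟩)
        (fun x hx hyx => by
          rcases List.mem_cons.mp (hcompl x hx (by omega)) with h | h
          · omega
          · exact h)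

-- ===== VERDICT (by name: the statement is the Claim_ definition above) =====
theorem to_html_v1_spec : Claim_equal_to_html_v1 := by
  unfold Claim_equal_to_html_v1
  intro raw fmt _ hpre
  obtain ⟨hnodup, hkv⟩ := hpre
  unfold Spec_to_html_v1
  simp only [to_html_v1, to_html_v1_alt]
  set chars := raw.toList with hchars
  set n := (chars.length : Int) with hn
  set items := PySem.List.sorted fmt (fun kv => pvMaxLen kv.2) true with hitems
  have hpre' : ∀ kv ∈ items, ∀ r ∈ kv.2, r.1 < r.2 → 0 ≤ r.1 := by
    intro kv hkvm
    exact (hkv kv ((PySem.List.mem_sorted fmt _ true kv).mp hkvm)).2.1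
  set cand := (fmt.flatMap (fun kv => kv.2.flatMap (fun r => [r.1, r.2]))).filter
      (fun p => decide (0 < p) && decide (p < n)) with hcand
  set pts := PySem.List.sorted (PySem.Set.ofList cand) (fun x => x) false with hpts
  by_cases hn0 : n = 0
  · -- empty text: both render ""
    have hcnil : chars = [] := List.eq_nil_of_length_eq_zero (by omega)
    have hcands : cand = [] := by
      rw [hcand]
      apply List.filter_eq_nil_iff.mpr
      intro a _
      rw [hn0]
      simp; omega
    have hptsnil : pts = [] := by
      rw [hpts, hcands]
      rfl
    rw [hcnil, hptsnil, if_pos hn0]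
    simp
  · have hnpos : 0 < n := lt_of_le_of_ne (hn ▸ Int.natCast_nonneg _) (Ne.symm hn0)
    -- A's position table is the pointwise active-format map
    have hpos : pvBuildPos n items (List.replicate chars.length ([] : List String)) =
        (PySem.List.pyRange 0 n 1).map (pvFmtsAt items) := by
      apply List.ext_getElem?
      intro k
      by_cases hk : k < chars.length
      · rw [buildPos_get n items hpre' _ (by simp [hn]) k (by simpa using hk)]
        rw [hn, PySem.List.getElem?_map_pyRange_zero (pvFmtsAt items) chars.length k hk]
        simp
      · rw [List.getElem?_eq_none, List.getElem?_eq_none]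
        · rw [List.length_map, PySem.List.length_pyRange_one]; omega
        · rw [buildPos_length]; simp; omega
    have hzip : chars.zip (pvBuildPos n items (List.replicate chars.length ([] : List String))) =
        pvAseg chars items 0 n := by
      rw [hpos]
      unfold pvAseg
      have hs : PySem.List.slice chars (some 0) (some n) = chars := by
        rw [PySem.List.slice_toNat chars (le_refl 0) (by omega)]
        simp only [Int.toNat_zero, Nat.sub_zero, List.drop_zero]
        apply List.take_of_length_le
        omega
      rw [hs]
    -- pts is exactly the strictly sorted list of in-range change points
    have hptssorted : pts.Pairwise (· < ·) := PySem.List.sorted_ofList_pairwise_lt cand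
    have hptsmem : ∀ x ∈ pts, 0 < x ∧ x < n := by
      intro x hx
      have h1 := (PySem.Set.mem_ofList cand x).mp ((PySem.List.mem_sorted _ _ _ x).mp hx)
      have h2 := (List.mem_filter.mp h1).2
      simpa using h2
    have hbnd : ∀ kv ∈ items, ∀ r ∈ kv.2,
        (0 < r.1 → r.1 < n → r.1 ∈ pts) ∧ (0 < r.2 → r.2 < n → r.2 ∈ pts) := by
      intro kv hkvm r hr
      have hkvf : kv ∈ fmt := (PySem.List.mem_sorted fmt _ true kv).mp hkvm
      constructor <;> intro h1 h2 <;>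
        · apply (PySem.List.mem_sorted _ _ _ _).mpr
          apply (PySem.Set.mem_ofList _ _).mpr
          apply List.mem_filter.mpr
          refine ⟨List.mem_flatMap.mpr ⟨kv, hkvf, List.mem_flatMap.mpr ⟨r, hr, by simp⟩⟩, ?_⟩
          simp [h1, h2]
    have hchain := cuts_chain_aux items pts n hbnd hpre' pts 0 (le_refl 0) hnpos hptssorted
      (fun x hx => hptsmem x hx) (fun x hx _ => hx)
    have hlast : (0 :: (pts ++ [n])).getLast (by simp) = n := by
      simp
    have hmain := chain_fold chars items n hn (pts ++ [n]) 0 ([], []) hchain hlast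
    rw [if_neg hn0, hzip, hmain]
    rfl
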